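-- pv_equiv track=rewrite | github.com/ada09aho/ada09aho | anders03m.py | countVehicleTypes
-- ===== SOURCE A (Python) =====
-- def countVehicleTypes(idList, count_pcu):
--     randoms, commuters, buses = [0, 0, 0]
--     if count_pcu:
--         busFactor = 3
--     else:
--         busFactor = 1
--     for id in idList:
--         if 'bus' in id:
--             buses += busFactor
--         elif 'commuter' in id:
--             commuters += 1
--         else:
--             randoms += 1
--     return [randoms, commuters, buses]
-- ===== SOURCE B (Python) =====
-- def countVehicleTypes(idList, count_pcu):
--     busFactor = 3 if count_pcu else 1
--     buses = busFactor * sum(1 for i in idList if 'bus' in i)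
--     commuters = sum(1 for i in idList if 'commuter' in i and 'bus' not in i)
--     randoms = sum(1 for i in idList if 'bus' not in i and 'commuter' not in i)
--     return [randoms, commuters, buses]
-- ===== Notes on version B (the rewrite author's own statement) =====
-- stated objective: alternative
-- what changed: Replaces the single stateful if/elif loop with three independent filtered counts (buses, commuters-excluding-bus, neither), combining them arithmetically; branch precedence is encoded in the predicates instead of control flow.
import Mathlib
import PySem

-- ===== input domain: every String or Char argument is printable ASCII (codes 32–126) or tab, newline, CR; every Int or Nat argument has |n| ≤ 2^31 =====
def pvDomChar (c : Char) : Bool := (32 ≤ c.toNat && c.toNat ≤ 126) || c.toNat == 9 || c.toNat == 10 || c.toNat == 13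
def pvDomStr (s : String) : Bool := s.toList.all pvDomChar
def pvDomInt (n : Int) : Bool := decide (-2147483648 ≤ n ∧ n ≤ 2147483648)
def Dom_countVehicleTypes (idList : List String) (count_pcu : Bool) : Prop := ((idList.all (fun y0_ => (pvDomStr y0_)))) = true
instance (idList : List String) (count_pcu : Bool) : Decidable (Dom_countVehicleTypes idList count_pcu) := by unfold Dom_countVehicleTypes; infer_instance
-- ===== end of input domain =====

-- B replaces A's single stateful if/elif loop by three independent filtered counts; same cost, different decomposition.

-- ===== PORT A =====
def countVehicleTypes (idList : List String) (count_pcu : Bool) : List Int :=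
  let busFactor : Int := if count_pcu then 3 else 1
  let st : Int × Int × Int := idList.foldl (fun acc id =>
    if PySem.Str.isIn "bus" id then (acc.1, acc.2.1, acc.2.2 + busFactor)
    else if PySem.Str.isIn "commuter" id then (acc.1, acc.2.1 + 1, acc.2.2)
    else (acc.1 + 1, acc.2.1, acc.2.2)) (0, 0, 0)
  [st.1, st.2.1, st.2.2]

-- ===== PORT B =====
def countVehicleTypes_alt (idList : List String) (count_pcu : Bool) : List Int :=
  let busFactor : Int := if count_pcu then 3 else 1
  let buses : Int := busFactor * (idList.countP (fun s => PySem.Str.isIn "bus" s) : Nat)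
  let commuters : Int := (idList.countP (fun s => PySem.Str.isIn "commuter" s && !PySem.Str.isIn "bus" s) : Nat)
  let randoms : Int := (idList.countP (fun s => !PySem.Str.isIn "bus" s && !PySem.Str.isIn "commuter" s) : Nat)
  [randoms, commuters, buses]

-- ===== PRECONDITION & SPEC =====
def Spec_countVehicleTypes (idList : List String) (count_pcu : Bool) (out : List Int) : Prop := out = countVehicleTypes_alt idList count_pcu
instance (idList : List String) (count_pcu : Bool) (out : List Int) : Decidable (Spec_countVehicleTypes idList count_pcu out) := by unfold Spec_countVehicleTypes; infer_instance

-- ===== CLAIM (what is proved, stated in full; the proofs are below) =====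
def Claim_equal_countVehicleTypes : Prop := ∀ (idList : List String) (count_pcu : Bool), Dom_countVehicleTypes idList count_pcu → Spec_countVehicleTypes idList count_pcu (countVehicleTypes idList count_pcu)

-- ===== LEMMAS AND PROOFS =====

theorem countVehicleTypes_fold (busFactor : Int) (P Q : String → Bool) (xs : List String)
    (r c b : Int) :
    xs.foldl (fun (acc : Int × Int × Int) id =>
      if P id then (acc.1, acc.2.1, acc.2.2 + busFactor)
      else if Q id then (acc.1, acc.2.1 + 1, acc.2.2)
      else (acc.1 + 1, acc.2.1, acc.2.2)) (r, c, b)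
    = (r + (xs.countP (fun s => !P s && !Q s) : Nat),
       c + (xs.countP (fun s => Q s && !P s) : Nat),
       b + busFactor * (xs.countP P : Nat)) := by
  induction xs generalizing r c b with
  | nil => simp
  | cons x xs ih =>
    simp only [List.foldl_cons, List.countP_cons]
    cases hP : P x <;> cases hQ : Q x <;>
      simp [hP, hQ, ih, Prod.ext_iff] <;> ring

-- ===== VERDICT (by name: the statement is the Claim_ definition above) =====
theorem countVehicleTypes_spec : Claim_equal_countVehicleTypes := by
  intro idList count_pcu _
  show countVehicleTypes idList count_pcu = countVehicleTypes_alt idList count_pcu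
  unfold countVehicleTypes countVehicleTypes_alt
  dsimp only
  rw [countVehicleTypes_fold _ (fun id => PySem.Str.isIn "bus" id)
        (fun id => PySem.Str.isIn "commuter" id)]
  simp
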